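-- pv_equiv track=rewrite | github.com/Saulog3/python-unifecaf | exercicios/Exercicio concluídos/aula02/02ex03.py | numeros_repetidos
-- ===== SOURCE A (Python) =====
-- def numeros_repetidos(lista):
--     repetidos = []
--     vistos = set()
--
--     for num in lista:
--         if lista.count(num) > 1 and num not in vistos: #lista.count(num) → conta quantas vezes o número aparece.
--             repetidos.append(num)
--             vistos.add(num)
--
--     return repetidos
-- ===== SOURCE B (Python) =====
-- def numeros_repetidos(lista):
--     contagem = {}
--     for num in lista:
--         contagem[num] = contagem.get(num, 0) + 1
--     return [num for num, c in contagem.items() if c > 1]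
-- ===== Notes on version B (the rewrite author's own statement) =====
-- stated objective: idiomatic
-- what changed: Replaced the O(n^2) per-element lista.count rescans plus a separate 'vistos' set with a single frequency-dict build (insertion order = first occurrence) followed by one pass over its distinct keys.
import Mathlib
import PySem

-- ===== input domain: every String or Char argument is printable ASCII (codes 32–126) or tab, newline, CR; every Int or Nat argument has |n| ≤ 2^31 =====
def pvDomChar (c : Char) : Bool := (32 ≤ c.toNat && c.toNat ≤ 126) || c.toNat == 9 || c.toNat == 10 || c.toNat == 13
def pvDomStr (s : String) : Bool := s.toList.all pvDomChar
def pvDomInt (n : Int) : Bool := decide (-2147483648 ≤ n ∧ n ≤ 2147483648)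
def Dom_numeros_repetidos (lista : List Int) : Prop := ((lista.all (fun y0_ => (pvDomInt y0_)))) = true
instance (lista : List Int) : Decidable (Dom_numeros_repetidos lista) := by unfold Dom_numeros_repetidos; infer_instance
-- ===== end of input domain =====

-- B replaces A's per-element `lista.count` rescans plus a `vistos` set with one frequency-table
-- build followed by a pass over the table's distinct keys (same first-occurrence order).

-- ===== PORT A =====
-- A: loop over lista; append num when lista.count(num) > 1 and num not yet in vistos.
def numeros_repetidos (lista : List Int) : List Int :=
  (lista.foldl
    (fun (st : List Int × PySem.Set Int) num =>
      if lista.count num > 1 ∧ ¬ PySem.Set.contains st.2 num then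
        (st.1 ++ [num], PySem.Set.add st.2 num)
      else st)
    ([], PySem.Set.empty)).1

-- ===== PORT B =====
-- B: build contagem (dict num ↦ occurrence count, insertion order), then keep keys with count > 1.
def numeros_repetidos_alt (lista : List Int) : List Int :=
  let contagem : PySem.Dict Int Int :=
    lista.foldl (fun d num => d.insert num (d.getD num 0 + 1)) PySem.Dict.empty
  (contagem.items.filter (fun p => p.2 > 1)).map Prod.fst

-- ===== PRECONDITION & SPEC =====
def Spec_numeros_repetidos (lista : List Int) (out : List Int) : Prop := out = numeros_repetidos_alt lista
instance (lista : List Int) (out : List Int) : Decidable (Spec_numeros_repetidos lista out) := by unfold Spec_numeros_repetidos; infer_instance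

-- ===== CLAIM (what is proved, stated in full; the proofs are below) =====
def Claim_equal_numeros_repetidos : Prop := ∀ (lista : List Int), Dom_numeros_repetidos lista → Spec_numeros_repetidos lista (numeros_repetidos lista)

-- ===== LEMMAS AND PROOFS =====

-- A's loop keeps vistos = repetidos (elements are always appended to both together),
-- and its repetidos over a prefix p is the pred-filter of Set.ofList p folded from the start state.
theorem aLoop_state (lista : List Int) (p : List Int) (s : PySem.Set Int) :
    p.foldl
      (fun (st : List Int × PySem.Set Int) num =>
        if lista.count num > 1 ∧ ¬ PySem.Set.contains st.2 num then
          (st.1 ++ [num], PySem.Set.add st.2 num)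
        else st)
      (s.filter (fun x => decide (lista.count x > 1)),
       s.filter (fun x => decide (lista.count x > 1)))
    = ((p.foldl PySem.Set.add s).filter (fun x => decide (lista.count x > 1)),
        (p.foldl PySem.Set.add s).filter (fun x => decide (lista.count x > 1))) := by
  induction p generalizing s with
  | nil => simp
  | cons a p ih =>
    simp only [List.foldl_cons]
    rw [← ih (PySem.Set.add s a)]
    congr 1
    by_cases hc : a ∈ s
    · have hf : a ∈ s.filter (fun x => decide (lista.count x > 1)) ∨ ¬ 1 < lista.count a := by
        by_cases hp : 1 < lista.count a
        · exact Or.inl (List.mem_filter.mpr ⟨hc, by simpa using hp⟩)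
        · exact Or.inr hp
      rcases hf with hf | hf
      · simp [PySem.Set.add, hc, hf]
      · simp [PySem.Set.add, hc, hf]
    · by_cases hp : 1 < lista.count a
      · have hf : a ∉ s.filter (fun x => decide (lista.count x > 1)) := by
          simp [List.mem_filter, hc]
        simp [PySem.Set.add, hc, hp, hf]
      · simp [PySem.Set.add, hc, hp]

theorem b_filter (lista : List Int) :
    numeros_repetidos_alt lista
      = (PySem.Set.ofList lista).filter (fun x => decide (lista.count x > 1)) := by
  show ((PySem.Dict.counter lista).items.filter (fun p => p.2 > 1)).map Prod.fst = _
  simp [PySem.Dict.items_counter, List.filter_map, Function.comp_def]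

-- ===== VERDICT (by name: the statement is the Claim_ definition above) =====
theorem numeros_repetidos_spec : Claim_equal_numeros_repetidos := by
  intro lista _
  show numeros_repetidos lista = numeros_repetidos_alt lista
  rw [b_filter]
  have h := aLoop_state lista lista PySem.Set.empty
  simp only [PySem.Set.empty, List.filter_nil] at h
  rw [numeros_repetidos]
  rw [show (PySem.Set.empty : PySem.Set Int) = ([] : List Int) from rfl, h]
  rw [PySem.Set.ofList_eq_foldl]
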